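-- pv_equiv track=rewrite | github.com/diothor/dcp-python | problems/problem_331.py | flip_count
-- ===== SOURCE A (Python) =====
-- def flip_count(string: str) -> int:
--     flips = 0
--     y_count = 0
--     for letter in string:
--         if letter == 'y':
--             y_count += 1
--         elif letter == 'x' and y_count > 0:
--             flips += y_count
--             y_count = 0
--     else:
--         return flips
-- ===== SOURCE B (Python) =====
-- def flip_count(string: str) -> int:
--     # Reverse scan: a 'y' causes one flip iff some 'x' occurs after it.
--     seen_x = False
--     total = 0
--     for ch in reversed(string):
--         if ch == 'x':
--             seen_x = True
--         elif ch == 'y' and seen_x: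
--             total += 1
--     return total
-- ===== Notes on version B (the rewrite author's own statement) =====
-- stated objective: alternative
-- what changed: Replaces the forward accumulate-and-flush loop (pending y_count flushed into flips at each x) with a single reverse scan keeping a boolean seen_x flag and counting each y that has a later x.
import Mathlib
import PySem

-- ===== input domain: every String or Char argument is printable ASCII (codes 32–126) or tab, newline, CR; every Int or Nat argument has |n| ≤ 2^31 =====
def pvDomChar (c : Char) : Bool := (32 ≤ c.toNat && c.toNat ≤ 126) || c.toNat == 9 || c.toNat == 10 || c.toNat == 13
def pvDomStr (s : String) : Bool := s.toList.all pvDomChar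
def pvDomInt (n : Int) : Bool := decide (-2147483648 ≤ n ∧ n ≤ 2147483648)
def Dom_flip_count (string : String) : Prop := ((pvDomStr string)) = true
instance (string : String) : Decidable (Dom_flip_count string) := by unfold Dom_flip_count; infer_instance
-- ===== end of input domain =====

-- B replaces A's forward accumulate-and-flush loop by a reverse scan with a boolean seen_x flag (alternative structure, same cost).

-- ===== PORT A =====
-- state (flips, y_count); A's branch order kept: 'y' first, then 'x' with y_count > 0
def flipStep (st : Int × Int) (letter : Char) : Int × Int :=
  if letter = 'y' then (st.1, st.2 + 1)
  else if letter = 'x' ∧ 0 < st.2 then (st.1 + st.2, 0)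
  else st

def flip_count (string : String) : Int :=
  (string.toList.foldl flipStep (0, 0)).1

-- ===== PORT B =====
-- state (seen_x, total); traverses reversed(string)
def flipAltStep (st : Bool × Int) (ch : Char) : Bool × Int :=
  if ch = 'x' then (true, st.2)
  else if ch = 'y' ∧ st.1 = true then (st.1, st.2 + 1)
  else st

def flip_count_alt (string : String) : Int :=
  (string.toList.reverse.foldl flipAltStep (false, 0)).2

-- ===== PRECONDITION & SPEC =====
def Spec_flip_count (string : String) (out : Int) : Prop := out = flip_count_alt string
instance (string : String) (out : Int) : Decidable (Spec_flip_count string out) := by unfold Spec_flip_count; infer_instance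

-- ===== CLAIM (what is proved, stated in full; the proofs are below) =====
def Claim_equal_flip_count : Prop := ∀ (string : String), Dom_flip_count string → Spec_flip_count string (flip_count string)

-- ===== LEMMAS AND PROOFS =====

-- common characterization: pvF l y = flips produced on l with y pending 'y's accumulated
def pvF : List Char → Int → Int
  | [], _ => 0
  | c :: t, y => if c = 'y' then pvF t (y + 1) else if c = 'x' then y + pvF t 0 else pvF t y

theorem pvF_pending (t : List Char) (y : Int) :
    pvF t y = (if 'x' ∈ t then y else 0) + pvF t 0 := by
  induction t generalizing y with
  | nil => simp [pvF]
  | cons c t ih =>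
    by_cases hy : c = 'y'
    · subst hy
      rw [pvF, if_pos rfl, pvF, if_pos rfl, ih (y + 1), ih (0 + 1)]
      by_cases hx : 'x' ∈ t <;> simp [hx] <;> ring
    · by_cases hx : c = 'x'
      · subst hx; simp [pvF]
      · rw [pvF, if_neg hy, if_neg hx, pvF, if_neg hy, if_neg hx, ih y]
        have hx' : ¬ ('x' = c) := fun h => hx h.symm
        simp [List.mem_cons, hx']

theorem flipA_inv (l : List Char) (flips y : Int) (hy : 0 ≤ y) :
    (l.foldl flipStep (flips, y)).1 = flips + pvF l y := by
  induction l generalizing flips y with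
  | nil => simp [pvF]
  | cons c t ih =>
    by_cases hc : c = 'y'
    · subst hc
      rw [List.foldl_cons, flipStep, if_pos rfl, pvF, if_pos rfl]
      exact ih flips (y + 1) (by omega)
    · by_cases hx : c = 'x'
      · subst hx
        rw [List.foldl_cons, pvF, if_neg hc, if_pos rfl]
        by_cases h0 : 0 < y
        · rw [flipStep, if_neg (by simp [hc]), if_pos ⟨rfl, h0⟩]
          rw [ih (flips + y) 0 le_rfl]; ring
        · have hy0 : y = 0 := le_antisymm (by omega) hy
          subst hy0
          rw [flipStep, if_neg (by simp [hc]), if_neg (by simp)]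
          rw [ih flips 0 le_rfl]; ring
      · rw [List.foldl_cons, flipStep, if_neg (by simp [hc]),
          if_neg (by simp [hx]), pvF, if_neg hc, if_neg hx]
        exact ih flips y hy

theorem flipB_inv (l : List Char) (seen : Bool) (tot : Int) :
    l.reverse.foldl flipAltStep (seen, tot) =
      ((seen || decide ('x' ∈ l)),
        tot + if seen then (l.count 'y' : Int) else pvF l 0) := by
  induction l generalizing seen tot with
  | nil => simp [pvF]
  | cons c t ih =>
    rw [List.reverse_cons, List.foldl_append, ih seen tot]
    by_cases hx : c = 'x'
    · subst hx
      rw [List.foldl_cons, List.foldl_nil, flipAltStep, if_pos rfl]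
      simp only [List.mem_cons, List.count_cons]
      by_cases hs : seen <;> simp [hs, pvF]
    · by_cases hy : c = 'y'
      · subst hy
        rw [List.foldl_cons, List.foldl_nil, flipAltStep, if_neg (by simp [hx])]
        by_cases hs : seen
        · subst hs
          rw [if_pos ⟨rfl, by simp⟩]
          simp [List.count_cons, hx]; ring
        · simp only [Bool.not_eq_true] at hs; subst hs
          by_cases hxt : 'x' ∈ t
          · rw [if_pos ⟨rfl, by simp [hxt]⟩]
            simp only [Bool.false_or]
            rw [pvF, if_pos rfl, pvF_pending t (0 + 1), if_pos hxt]
            simp [List.mem_cons, hx, hxt]; ring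
          · rw [if_neg (by simp [hxt])]
            simp only [Bool.false_or]
            rw [pvF, if_pos rfl, pvF_pending t (0 + 1), if_neg hxt]
            simp [List.mem_cons, hx, hxt]
      · rw [List.foldl_cons, List.foldl_nil, flipAltStep, if_neg (by simp [hx]),
          if_neg (by simp [hy])]
        have hx' : ¬ ('x' = c) := fun h => hx h.symm
        simp [List.mem_cons, hx', List.count_cons, hy, pvF]

-- ===== VERDICT (by name: the statement is the Claim_ definition above) =====
theorem flip_count_spec : Claim_equal_flip_count := by
  intro s _
  show flip_count s = flip_count_alt s
  rw [flip_count, flip_count_alt, flipA_inv s.toList 0 0 le_rfl, flipB_inv s.toList false 0]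
  simp
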